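-- pv_equiv track=rewrite | github.com/LuckyIYI/SAD | backends/pytorch/train.py | _hilbert_bits_for_size
-- ===== SOURCE A (Python) =====
-- def _hilbert_bits_for_size(width: int, height: int) -> int:
--     max_dim = max(width, height)
--     n = 1
--     bits = 0
--     while n < max_dim:
--         n <<= 1
--         bits += 1
--     return bits
-- ===== SOURCE B (Python) =====
-- def _hilbert_bits_for_size(width: int, height: int) -> int:
--     return max(max(width, height) - 1, 0).bit_length()
-- ===== Notes on version B (the rewrite author's own statement) =====
-- stated objective: idiomatic
-- what changed: Replaced the doubling while-loop with the closed-form max(max(width,height)-1,0).bit_length().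
import Mathlib
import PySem

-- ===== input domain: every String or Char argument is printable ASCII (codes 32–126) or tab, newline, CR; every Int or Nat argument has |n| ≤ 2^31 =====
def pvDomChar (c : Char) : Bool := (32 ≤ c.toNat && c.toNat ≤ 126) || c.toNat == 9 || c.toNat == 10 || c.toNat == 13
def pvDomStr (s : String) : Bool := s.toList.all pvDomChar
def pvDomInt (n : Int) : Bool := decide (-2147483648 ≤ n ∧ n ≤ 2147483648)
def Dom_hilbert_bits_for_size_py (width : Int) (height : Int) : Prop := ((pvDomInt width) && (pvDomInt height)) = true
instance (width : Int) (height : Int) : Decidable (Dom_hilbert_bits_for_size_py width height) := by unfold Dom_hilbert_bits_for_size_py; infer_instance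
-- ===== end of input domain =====

-- B replaces A's doubling while-loop with the closed-form bit_length expression (idiomatic).

-- ===== PORT A =====
-- A's while-loop; carries the invariant 0 < n (n starts at 1 and only doubles) for termination
def hilbertLoopA (max_dim : Int) (n : Int) (bits : Int) (hn : 0 < n) : Int :=
  if h : n < max_dim then
    hilbertLoopA max_dim (2 * n) (bits + 1) (by omega)
  else
    bits
termination_by (max_dim - n).toNat
decreasing_by omega

def hilbert_bits_for_size_py (width : Int) (height : Int) : Int :=
  let max_dim := max width height
  hilbertLoopA max_dim 1 0 (by omega)

-- ===== PORT B =====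
-- max(max_dim - 1, 0).bit_length(): bit_length of a nonnegative int is Nat.size
def hilbert_bits_for_size_py_alt (width : Int) (height : Int) : Int :=
  let max_dim := max width height
  ((max (max_dim - 1) 0).toNat.size : Int)

-- ===== PRECONDITION & SPEC =====
def Spec_hilbert_bits_for_size_py (width : Int) (height : Int) (out : Int) : Prop := out = hilbert_bits_for_size_py_alt width height
instance (width : Int) (height : Int) (out : Int) : Decidable (Spec_hilbert_bits_for_size_py width height out) := by unfold Spec_hilbert_bits_for_size_py; infer_instance

-- ===== CLAIM (what is proved, stated in full; the proofs are below) =====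
def Claim_equal_hilbert_bits_for_size_py : Prop := ∀ (width : Int) (height : Int), Dom_hilbert_bits_for_size_py width height → Spec_hilbert_bits_for_size_py width height (hilbert_bits_for_size_py width height)

-- ===== LEMMAS AND PROOFS =====

lemma hilbertLoopA_not_lt (m n bits : Int) (hn : 0 < n) (h : ¬ n < m) :
    hilbertLoopA m n bits hn = bits := by
  rw [hilbertLoopA]; simp [h]

-- if the loop runs at least once, its result is bits + (k+1) where k+1 doublings
-- bracket max_dim: n * 2^k < m ≤ n * 2^(k+1)
lemma hilbertLoopA_bound : ∀ (d : Nat) (m n bits : Int) (hn : 0 < n), (m - n).toNat ≤ d → n < m →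
    ∃ k : Nat, hilbertLoopA m n bits hn = bits + (k + 1) ∧ m ≤ n * 2 ^ (k + 1) ∧ n * 2 ^ k < m := by
  intro d
  induction d with
  | zero => intro m n bits hn hd hlt; omega
  | succ d ih =>
    intro m n bits hn hd hlt
    rw [hilbertLoopA, dif_pos hlt]
    by_cases h2 : 2 * n < m
    · obtain ⟨k, hk, hub, hlb⟩ := ih m (2 * n) (bits + 1) (by omega) (by omega) h2
      refine ⟨k + 1, ?_, ?_, ?_⟩
      · rw [hk]; push_cast; ring
      · calc m ≤ 2 * n * 2 ^ (k + 1) := hub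
          _ = n * 2 ^ (k + 1 + 1) := by ring
      · calc n * 2 ^ (k + 1) = 2 * n * 2 ^ k := by ring
          _ < m := hlb
    · refine ⟨0, ?_, ?_, ?_⟩
      · rw [hilbertLoopA_not_lt m (2 * n) (bits + 1) (by omega) h2]; norm_num
      · have : n * 2 ^ (0 + 1) = 2 * n := by ring
        rw [this]; omega
      · simpa using hlt

-- the loop starting from n = 1, bits = 0 computes bit_length(max(m-1,0))
lemma hilbertLoopA_main (m : Int) (h01 : (0 : Int) < 1) :
    hilbertLoopA m 1 0 h01 = ((max (m - 1) 0).toNat.size : Int) := by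
  by_cases h1 : 1 < m
  · obtain ⟨k, hk, hub, hlb⟩ := hilbertLoopA_bound (m - 1).toNat m 1 0 h01 (by omega) h1
    rw [hk]
    simp only [one_mul] at hub hlb
    have hmax : max (m - 1) 0 = m - 1 := by omega
    rw [hmax]
    have htm : ((m - 1).toNat : Int) = m - 1 := by omega
    have hA : (m - 1).toNat < 2 ^ (k + 1) := by
      have h : ((m - 1).toNat : Int) < ((2 ^ (k + 1) : Nat) : Int) := by push_cast; omega
      exact_mod_cast h
    have hB : 2 ^ k ≤ (m - 1).toNat := by
      have h : ((2 ^ k : Nat) : Int) ≤ ((m - 1).toNat : Int) := by push_cast; omega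
      exact_mod_cast h
    have hle : Nat.size (m - 1).toNat ≤ k + 1 := Nat.size_le.mpr hA
    have hlt : k < Nat.size (m - 1).toNat := Nat.lt_size.mpr hB
    omega
  · rw [hilbertLoopA_not_lt m 1 0 h01 (by omega)]
    have h0 : max (m - 1) 0 = 0 := by omega
    rw [h0]
    simp

-- ===== VERDICT (by name: the statement is the Claim_ definition above) =====
theorem hilbert_bits_for_size_py_spec : Claim_equal_hilbert_bits_for_size_py := by
  intro width height _
  unfold Spec_hilbert_bits_for_size_py hilbert_bits_for_size_py hilbert_bits_for_size_py_alt
  exact hilbertLoopA_main (max width height) _
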